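-- pv_equiv track=rewrite | github.com/kwakminoo/AI-Guitar-Tab | backend/tab_generator.py | _calculate_difficulty
-- ===== SOURCE A (Python) =====
-- from typing import List, Dict, Tuple
--
-- def _calculate_difficulty(positions: List) -> int:
--     """
--     코드의 난이도를 계산합니다 (1-5).
--     """
--     if not any(pos for pos in positions if pos is not None):
--         return 1  # 오픈 코드
--
--     frets = [pos for pos in positions if pos is not None and pos > 0]
--
--     if not frets:
--         return 1
--
--     # 프렛 범위
--     fret_range = max(frets) - min(frets) if frets else 0
--
--     # 바레 코드 확인
--     is_barre = len(set(frets)) < len(frets)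
--
--     # 높은 프렛 사용
--     high_frets = any(fret > 5 for fret in frets)
--
--     difficulty = 1
--     if fret_range > 3:
--         difficulty += 1
--     if is_barre:
--         difficulty += 1
--     if high_frets:
--         difficulty += 1
--     if len(frets) > 4:
--         difficulty += 1
--
--     return min(difficulty, 5)
-- ===== SOURCE B (Python) =====
-- def _calculate_difficulty(positions):
--     # Sort the positive frets once; extremes come from the ends, a barre
--     # (duplicate) shows up as two equal neighbours.  The original's initial
--     # any-truthy check is redundant: no positive frets already yields 1.
--     fs = sorted(p for p in positions if p is not None and p > 0)
--     if not fs: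
--         return 1
--     score = 1
--     if fs[-1] - fs[0] > 3:
--         score += 1
--     if any(a == b for a, b in zip(fs, fs[1:])):
--         score += 1
--     if fs[-1] > 5:
--         score += 1
--     if len(fs) > 4:
--         score += 1
--     return min(score, 5)
-- ===== Notes on version B (the rewrite author's own statement) =====
-- stated objective: simpler
-- what changed: B sorts the positive frets once and reads every feature off the sorted list (range from the two ends, barre from equal neighbours, high fret from the last element), dropping A's redundant any-truthy pass and its set construction with min/max/any rescans.
import Mathlib
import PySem

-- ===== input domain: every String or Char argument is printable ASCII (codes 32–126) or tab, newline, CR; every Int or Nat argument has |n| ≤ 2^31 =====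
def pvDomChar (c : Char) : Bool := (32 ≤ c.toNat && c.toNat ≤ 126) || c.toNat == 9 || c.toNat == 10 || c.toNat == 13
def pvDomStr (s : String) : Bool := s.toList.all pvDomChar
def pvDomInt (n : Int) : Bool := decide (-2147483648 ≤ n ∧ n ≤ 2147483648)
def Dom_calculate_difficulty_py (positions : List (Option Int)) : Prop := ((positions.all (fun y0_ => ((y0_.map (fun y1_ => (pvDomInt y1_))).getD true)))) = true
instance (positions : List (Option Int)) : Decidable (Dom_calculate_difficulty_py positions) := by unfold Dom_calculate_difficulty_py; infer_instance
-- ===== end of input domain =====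

-- B sorts the positive frets once and reads all features off the sorted list; objective: simpler (same result, no speed claim).

-- ===== PORT A =====
def calculate_difficulty_py (positions : List (Option Int)) : Int :=
  if ¬ positions.any (fun pos => match pos with | some v => decide (v ≠ 0) | none => false) then 1
  else
    let frets := positions.filterMap
      (fun pos => match pos with
        | some v => if v > 0 then some v else none
        | none => none)
    if frets = [] then 1
    else
      let fret_range : Int :=
        if frets ≠ [] then
          (PySem.List.max? frets (fun x => x)).getD 0 - (PySem.List.min? frets (fun x => x)).getD 0
        else 0
      let is_barre := PySem.Set.len (PySem.Set.ofList frets) < frets.length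
      let high_frets := frets.any (fun fret => decide (fret > 5))
      let difficulty : Int := 1
      let difficulty := if fret_range > 3 then difficulty + 1 else difficulty
      let difficulty := if is_barre then difficulty + 1 else difficulty
      let difficulty := if high_frets then difficulty + 1 else difficulty
      let difficulty := if frets.length > 4 then difficulty + 1 else difficulty
      min difficulty 5

-- ===== PORT B =====
def calculate_difficulty_py_alt (positions : List (Option Int)) : Int :=
  let fs := PySem.List.sorted
    (positions.filterMap
      (fun pos => match pos with
        | some v => if v > 0 then some v else none
        | none => none))
    (fun x => x) false
  match fs with
  | [] => 1
  | y :: t =>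
    -- fs[0] = y, fs[-1] = (y :: t).getLast (in range: fs is nonempty here)
    let lastv := (y :: t).getLast (List.cons_ne_nil y t)
    let score : Int := 1
    let score := if lastv - y > 3 then score + 1 else score
    -- any(a == b for a, b in zip(fs, fs[1:]))
    let score := if ((y :: t).zip t).any (fun p => p.1 == p.2) then score + 1 else score
    let score := if lastv > 5 then score + 1 else score
    let score := if (y :: t).length > 4 then score + 1 else score
    min score 5

-- ===== PRECONDITION & SPEC =====
def Spec_calculate_difficulty_py (positions : List (Option Int)) (out : Int) : Prop := out = calculate_difficulty_py_alt positions
instance (positions : List (Option Int)) (out : Int) : Decidable (Spec_calculate_difficulty_py positions out) := by unfold Spec_calculate_difficulty_py; infer_instance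

-- ===== CLAIM (what is proved, stated in full; the proofs are below) =====
def Claim_equal_calculate_difficulty_py : Prop := ∀ (positions : List (Option Int)), Dom_calculate_difficulty_py positions → Spec_calculate_difficulty_py positions (calculate_difficulty_py positions)

-- ===== LEMMAS AND PROOFS =====

/-- In a ≤-sorted list every element is at most the last one. -/
lemma le_getLast_of_pairwise (fs : List Int) (h : fs.Pairwise (· ≤ ·)) (hne : fs ≠ [])
    (x : Int) (hx : x ∈ fs) : x ≤ fs.getLast hne := by
  induction fs with
  | nil => cases hx
  | cons a t ih =>
    cases t with
    | nil => simp at hx; simp [hx, List.getLast]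
    | cons b u =>
      rw [List.getLast_cons (by simp)]
      rcases List.mem_cons.mp hx with rfl | hx'
      · exact le_trans (List.rel_of_pairwise_cons h (List.getLast_mem _))
          (le_refl _)
      · exact ih (List.Pairwise.of_cons h) (by simp) hx'

/-- Adjacent-equality scan of a ≤-sorted list detects exactly non-Nodup. -/
lemma zip_any_eq_not_nodup (fs : List Int) (h : fs.Pairwise (· ≤ ·)) :
    ((fs.zip fs.tail).any (fun p => p.1 == p.2)) = !fs.Nodup := by
  induction fs with
  | nil => simp
  | cons a t ih =>
    cases t with
    | nil => simp
    | cons b u =>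
      have hbt : (b :: u).Pairwise (· ≤ ·) := List.Pairwise.of_cons h
      have ih' := ih hbt
      simp only [List.tail_cons, List.zip_cons_cons, List.any_cons] at ih' ⊢
      by_cases hab : a = b
      · subst hab
        simp [List.nodup_cons]
      · have hane : a ∉ b :: u := by
          intro hmem
          rcases List.mem_cons.mp hmem with rfl | hm
          · exact hab rfl
          · have h1 : a ≤ b := List.rel_of_pairwise_cons h (List.mem_cons_self)
            have h2 : b ≤ a := List.rel_of_pairwise_cons hbt hm
            exact hab (le_antisymm h1 h2)
        have : (a == b) = false := by simp [hab]
        rw [this, Bool.false_or, ih']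
        simp [List.nodup_cons, hane]

lemma ofList_append_singleton (fs : List Int) (v : Int) :
    PySem.Set.ofList (fs ++ [v]) = PySem.Set.add (PySem.Set.ofList fs) v := by
  rw [PySem.Set.ofList_eq_foldl, PySem.Set.ofList_eq_foldl, List.foldl_append]
  rfl

lemma ofList_length_le (t : List Int) : (PySem.Set.ofList t).length ≤ t.length := by
  induction t using List.reverseRecOn with
  | nil => simp [PySem.Set.ofList]
  | append_singleton s v ih =>
    rw [ofList_append_singleton]
    unfold PySem.Set.add
    split_ifs <;> simp <;> omega

lemma nodup_append_singleton (fs : List Int) (v : Int) :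
    (fs ++ [v]).Nodup ↔ fs.Nodup ∧ v ∉ fs := by
  simp only [List.nodup_append, List.nodup_cons, List.not_mem_nil, not_false_eq_true,
    List.nodup_nil, and_true, true_and]
  constructor
  · rintro ⟨h1, h2⟩
    exact ⟨h1, fun hm => h2 v hm v (List.mem_singleton_self v) rfl⟩
  · rintro ⟨h1, h2⟩
    refine ⟨h1, fun a ha b hb => ?_⟩
    rw [List.mem_singleton] at hb
    subst hb
    exact fun he => h2 (he ▸ ha)

lemma ofList_length_lt_iff (fs : List Int) :
    (PySem.Set.ofList fs).length < fs.length ↔ ¬ fs.Nodup := by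
  induction fs using List.reverseRecOn with
  | nil => simp [PySem.Set.ofList]
  | append_singleton t v ih =>
    have hle := ofList_length_le t
    rw [ofList_append_singleton]
    by_cases hmem : v ∈ t
    · have hadd : PySem.Set.add (PySem.Set.ofList t) v = PySem.Set.ofList t := by
        simp [PySem.Set.add, PySem.Set.contains, PySem.Set.mem_ofList, hmem]
      rw [hadd]
      simp only [List.length_append, List.length_cons, List.length_nil, nodup_append_singleton]
      constructor
      · intro _ h; exact h.2 hmem
      · intro _; omega
    · have hadd : PySem.Set.add (PySem.Set.ofList t) v = PySem.Set.ofList t ++ [v] := by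
        simp [PySem.Set.add, PySem.Set.contains, PySem.Set.mem_ofList, hmem]
      rw [hadd]
      simp only [List.length_append, List.length_cons, List.length_nil, nodup_append_singleton]
      constructor
      · intro h hc
        exact (ih.mp (by omega)) hc.1
      · intro h
        have hnd : ¬ t.Nodup := by tauto
        have := ih.mpr hnd
        omega

lemma set_len_lt_iff (fs : List Int) :
    PySem.Set.len (PySem.Set.ofList fs) < (fs.length : Int) ↔ ¬ fs.Nodup := by
  have h : PySem.Set.len (PySem.Set.ofList fs) = ((PySem.Set.ofList fs).length : Int) := rfl
  rw [h, ← ofList_length_lt_iff fs]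
  omega

-- ===== VERDICT (by name: the statement is the Claim_ definition above) =====
theorem calculate_difficulty_py_spec : Claim_equal_calculate_difficulty_py := by
  intro positions _
  unfold Spec_calculate_difficulty_py calculate_difficulty_py calculate_difficulty_py_alt
  set raw := positions.filterMap
      (fun pos => match pos with
        | some v => if v > 0 then some v else none
        | none => none) with hraw
  have hmemraw : ∀ x, x ∈ raw → 0 < x := by
    intro x hx
    rw [hraw, List.mem_filterMap] at hx
    obtain ⟨pos, _, hp⟩ := hx
    cases pos with
    | none => simp at hp
    | some v =>
      by_cases hv : v > 0 <;> simp [hv] at hp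
      omega
  cases hfs : PySem.List.sorted raw (fun x => x) false with
  | nil =>
    have hr : raw = [] := by
      have := PySem.List.sorted_eq_nil_iff raw (fun x => x) false
      rw [hfs] at this; exact this.mp rfl
    simp only [hr]
    split_ifs <;> simp
  | cons y t =>
    have hperm : (y :: t).Perm raw := by
      rw [← hfs]; exact PySem.List.sorted_perm raw (fun x => x) false
    have hpw : (y :: t).Pairwise (· ≤ ·) := by
      have := PySem.List.sorted_pairwise (xs := raw) (key := fun x => x)
      rw [hfs] at this; exact this
    have hrne : raw ≠ [] := by
      intro h; rw [h] at hperm; exact absurd hperm.length_eq (by simp)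
    -- the initial any-truthy check: a positive fret exists, so it passes
    have hy_raw : y ∈ raw := hperm.mem_iff.mp (List.mem_cons_self)
    have hsaw : positions.any (fun pos => match pos with | some v => decide (v ≠ 0) | none => false) = true := by
      rw [hraw, List.mem_filterMap] at hy_raw
      obtain ⟨pos, hpmem, hp⟩ := hy_raw
      cases pos with
      | none => simp at hp
      | some v =>
        by_cases hv : v > 0 <;> simp [hv] at hp
        refine List.any_eq_true.mpr ⟨some v, hpmem, ?_⟩
        simp; omega
    rw [if_neg (not_not_intro hsaw), if_neg hrne, if_pos hrne]
    -- identify head with min, last with max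
    set lastv := (y :: t).getLast (List.cons_ne_nil y t) with hlast
    have hlast_mem : lastv ∈ raw := hperm.mem_iff.mp (List.getLast_mem _)
    have hlast_max : ∀ x ∈ raw, x ≤ lastv := by
      intro x hx
      exact le_getLast_of_pairwise (y :: t) hpw (List.cons_ne_nil y t) x (hperm.mem_iff.mpr hx)
    have hy_min : ∀ x ∈ raw, y ≤ x := by
      have := PySem.List.key_head_sorted_le (xs := raw) (key := fun x => x) hfs
      simpa using this
    have hmax : PySem.List.max? raw (fun x => x) = some lastv := by
      cases hm : PySem.List.max? raw (fun x => x) with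
      | none => exact absurd (Iff.mp (PySem.List.max?_eq_none_iff raw (fun x => x)) hm) hrne
      | some m =>
        have hm_mem : m ∈ raw := PySem.List.max?_mem hm
        have h1 : lastv ≤ m := by simpa using (PySem.List.max?_isMax hm) lastv hlast_mem
        rw [le_antisymm (hlast_max m hm_mem) h1]
    have hmin : PySem.List.min? raw (fun x => x) = some y := by
      cases hm : PySem.List.min? raw (fun x => x) with
      | none => exact absurd (Iff.mp (PySem.List.min?_eq_none_iff raw (fun x => x)) hm) hrne
      | some n =>
        have hn_mem : n ∈ raw := PySem.List.min?_mem hm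
        have h1 : n ≤ y := by simpa using (PySem.List.min?_isMin hm) y hy_raw
        rw [le_antisymm h1 (hy_min n hn_mem)]
    have hbarre : (PySem.Set.len (PySem.Set.ofList raw) < (((y :: t).length : Int))) =
        ((((y :: t).zip t).any (fun p => p.1 == p.2)) = true) := by
      rw [eq_iff_iff, hperm.length_eq, set_len_lt_iff, ← hperm.nodup_iff]
      have := zip_any_eq_not_nodup (y :: t) hpw
      simp only [List.tail_cons] at this
      rw [this]
      by_cases h : (y :: t).Nodup <;> simp [h]
    have hhigh : (raw.any (fun fret => decide (fret > 5))) = decide (lastv > 5) := by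
      by_cases h : lastv > 5
      · simp only [h, decide_true]
        exact List.any_eq_true.mpr ⟨lastv, hlast_mem, by simpa using h⟩
      · simp only [h, decide_false]
        refine List.any_eq_false.mpr ?_
        intro x hx
        have := hlast_max x hx
        simp; omega
    have hlen : raw.length = (y :: t).length := hperm.length_eq.symm
    simp only [hmax, hmin, Option.getD_some, hhigh, hlen, hbarre, decide_eq_true_eq, ← hlast]
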